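-- pv_equiv track=rewrite | github.com/miliar/Code_Jam_Webscraper | solutions_python/Problem_178/2140.py | pancakes
-- ===== SOURCE A (Python) =====
-- def pancakes(stack):
--     count = 0
--     while True:
--         flip_index = ''.join(stack).rfind('-')
--         if -1 == flip_index:
--             return count
--         count += 1
--         stack = ['+' if ch == '-' else '-' for ch in stack[:flip_index]]
-- ===== SOURCE B (Python) =====
-- def pancakes(stack):
--     # Join once, find the last '-', then count sign alternations among the
--     # (conceptually flipped) kept prefix instead of re-flipping repeatedly.
--     s = ''.join(stack)
--     j = s.rfind('-')
--     if j == -1: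
--         return 0
--     signs = [e == '-' for e in stack[:j]]
--     count = 1
--     for a, b in zip(signs, signs[1:]):
--         if a != b:
--             count += 1
--     if signs and not signs[-1]:
--         count += 1
--     return count
-- ===== Notes on version B (the rewrite author's own statement) =====
-- stated objective: alternative
-- what changed: Replaces the repeated join/rfind/flip while-loop by one join, one rfind and a single alternation-counting pass over the kept prefix.
import Mathlib
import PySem

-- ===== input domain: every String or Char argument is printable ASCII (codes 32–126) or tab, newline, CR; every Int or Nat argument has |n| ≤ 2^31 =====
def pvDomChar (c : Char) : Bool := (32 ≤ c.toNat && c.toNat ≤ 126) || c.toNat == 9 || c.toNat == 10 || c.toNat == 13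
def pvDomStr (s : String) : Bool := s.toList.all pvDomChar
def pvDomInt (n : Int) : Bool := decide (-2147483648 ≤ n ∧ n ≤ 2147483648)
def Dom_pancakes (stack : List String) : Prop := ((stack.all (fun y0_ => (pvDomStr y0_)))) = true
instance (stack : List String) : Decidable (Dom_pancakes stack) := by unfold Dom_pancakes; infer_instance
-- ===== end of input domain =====

-- B replaces A's repeated join/rfind/flip while-loop by one join, one rfind and a single
-- alternation-counting pass; equal return value on every input (A mutates nothing).

-- ===== PORT A =====
-- ['+' if ch == '-' else '-' for ch in …]'s element map
def pvFlip (e : String) : String := if e = "-" then "+" else "-"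

-- lemmas the port needs for termination (cited in decreasing_by)
theorem pvJoinNilChars (l : List (List Char)) : List.intercalate [] l = l.flatten := by
  induction l with
  | nil => rfl
  | cons a t ih => cases t <;> simp_all [List.intercalate, List.intersperse]

theorem pvJoinChars (stack : List String) :
    (PySem.Str.join "" stack).toList = (stack.map String.toList).flatten := by
  rw [PySem.Str.toList_join]
  simpa [PySem.Chars.join] using pvJoinNilChars (stack.map String.toList)

theorem pvGo_cases (cs : List Char) (k : Nat) :
    PySem.Chars.rfind.go cs ['-'] k = -1 ∨
    (∃ j : Nat, j ≤ k ∧ PySem.Chars.rfind.go cs ['-'] k = (j : Int) ∧ cs[j]? = some '-') := by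
  induction k with
  | zero =>
    by_cases h : cs[0]? = some '-'
    · right; exact ⟨0, le_refl 0, by
        simp [PySem.Chars.rfind.go]
        cases cs with
        | nil => simp at h
        | cons c cs' => simp_all, h⟩
    · left
      simp [PySem.Chars.rfind.go]
      cases cs with
      | nil => simp
      | cons c cs' => simp_all [eq_comm]
  | succ k ih =>
    by_cases h : cs[k+1]? = some '-'
    · right; refine ⟨k+1, le_refl _, ?_, h⟩
      have hpre : (['-'].isPrefixOf (cs.drop (k+1))) = true := by
        cases hd : cs.drop (k+1) with
        | nil => rw [← List.head?_drop, hd] at h; simp at h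
        | cons c cs' =>
          rw [← List.head?_drop, hd] at h
          simp at h
          simp [List.isPrefixOf, h]
      simp [PySem.Chars.rfind.go, hpre]
    · have hpre : (['-'].isPrefixOf (cs.drop (k+1))) = false := by
        cases hd : cs.drop (k+1) with
        | nil => simp [List.isPrefixOf]
        | cons c cs' =>
          rw [← List.head?_drop, hd] at h
          simp at h
          have hcc : ¬ '-' = c := fun he => h he.symm
          simp [List.isPrefixOf, hcc]
      rcases ih with h1 | ⟨j, hj, hgo, hc⟩
      · left; simp [PySem.Chars.rfind.go, hpre, h1]
      · right; exact ⟨j, Nat.le_succ_of_le hj, by simp [PySem.Chars.rfind.go, hpre, hgo], hc⟩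

theorem pvFlipLen (e : String) : (pvFlip e).toList.length = 1 := by
  unfold pvFlip; split <;> rfl

-- the while-loop of A (count, stack are its state)
def pancakesLoop (count : Int) (stack : List String) : Int :=
  let fi := PySem.Str.rfind (PySem.Str.join "" stack) "-"
  if fi = -1 then count
  else pancakesLoop (count + 1) ((PySem.List.slice stack none (some fi)).map pvFlip)
termination_by (PySem.Str.join "" stack).toList.length
decreasing_by
  rename_i hne
  have hcases := pvGo_cases (PySem.Str.join "" stack).toList (PySem.Str.join "" stack).toList.length
  have hfi : PySem.Str.rfind (PySem.Str.join "" stack) "-" =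
      PySem.Chars.rfind (PySem.Str.join "" stack).toList ['-'] := by
    simp [PySem.Str.rfind]
  have hne' : PySem.Str.rfind (PySem.Str.join "" stack) "-" ≠ -1 := hne
  rw [hfi] at hne' ⊢
  unfold PySem.Chars.rfind at hne' ⊢
  rcases hcases with h1 | ⟨j, _, hgo, hc⟩
  · exact absurd h1 hne'
  · rw [hgo]
    have hjlt : j < (PySem.Str.join "" stack).toList.length := by
      exact List.getElem?_eq_some_iff.mp hc |>.1 |>.trans_le (le_refl _) |> (fun h => h)
    have hslice : PySem.List.slice stack none (some (j : Int)) = stack.take j :=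
      PySem.List.slice_to_natCast stack j
    rw [hslice, pvJoinChars]
    have : ((List.map pvFlip (stack.take j)).map String.toList).flatten.length
        = (stack.take j).length := by
      induction (stack.take j) with
      | nil => simp
      | cons a t ih =>
        simp only [List.map_cons, List.flatten_cons, List.length_append, pvFlipLen, ih,
          List.length_cons]
        omega
    rw [this]
    calc (stack.take j).length ≤ j := by simp
      _ < _ := hjlt

def pancakes (stack : List String) : Int := pancakesLoop 0 stack

-- ===== PORT B =====
def pancakes_alt (stack : List String) : Int :=
  let s := PySem.Str.join "" stack
  let j := PySem.Str.rfind s "-"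
  if j = -1 then 0
  else
    let signs := (PySem.List.slice stack none (some j)).map (fun e => decide (e = "-"))
    let count := (signs.zip signs.tail).foldl
      (fun c (ab : Bool × Bool) => if ab.1 ≠ ab.2 then c + 1 else c) 1
    -- `if signs and not signs[-1]` (signs[-1] exists exactly when signs is nonempty)
    if signs.getLast? = some false then count + 1 else count

-- ===== PRECONDITION & SPEC =====
def Spec_pancakes (stack : List String) (out : Int) : Prop := out = pancakes_alt stack
instance (stack : List String) (out : Int) : Decidable (Spec_pancakes stack out) := by unfold Spec_pancakes; infer_instance

-- ===== CLAIM (what is proved, stated in full; the proofs are below) =====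
def Claim_equal_pancakes : Prop := ∀ (stack : List String), Dom_pancakes stack → Spec_pancakes stack (pancakes stack)

-- ===== LEMMAS AND PROOFS =====

-- number of adjacent sign changes
def pvChanges : List Bool → Int
  | a :: b :: r => (if a ≠ b then 1 else 0) + pvChanges (b :: r)
  | _ => 0

def pvSign (b : Bool) : String := if b then "-" else "+"
def pvSC (b : Bool) : Char := if b then '-' else '+'

-- boundary contribution between two adjacent blocks
def pvB : Option Bool → Option Bool → Int
  | some a, some b => if a ≠ b then 1 else 0
  | _, _ => 0

theorem pvPrefixSingle (c : Char) (l : List Char) :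
    ([c].isPrefixOf l) = true ↔ l[0]? = some c := by
  cases l with
  | nil => simp [List.isPrefixOf]
  | cons c' t =>
    show ((c == c') && List.isPrefixOf [] t) = true ↔ _
    rw [show List.isPrefixOf ([] : List Char) t = true from rfl]
    simp only [Bool.and_true, beq_iff_eq, List.getElem?_cons_zero, Option.some.injEq]
    exact eq_comm

theorem pvGo_of_none (cs : List Char) (k : Nat)
    (h : ∀ i : Nat, i ≤ k → cs[i]? ≠ some '-') :
    PySem.Chars.rfind.go cs ['-'] k = -1 := by
  induction k with
  | zero =>
    have h0 := h 0 (le_refl 0)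
    have : (['-'].isPrefixOf cs) ≠ true := fun hp => h0 ((pvPrefixSingle '-' cs).mp hp)
    simp [PySem.Chars.rfind.go, this]
  | succ k ih =>
    have hk := h (k+1) (le_refl _)
    have hpre : (['-'].isPrefixOf (cs.drop (k+1))) ≠ true := by
      intro hp
      exact hk (by simpa [List.head?_drop] using ((pvPrefixSingle '-' _).mp hp))
    simp [PySem.Chars.rfind.go, hpre, ih (fun i hi => h i (Nat.le_succ_of_le hi))]

theorem pvGo_of_last (cs : List Char) (j k : Nat)
    (hj : cs[j]? = some '-') (hk : j ≤ k)
    (h : ∀ i : Nat, j < i → i ≤ k → cs[i]? ≠ some '-') :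
    PySem.Chars.rfind.go cs ['-'] k = (j : Int) := by
  induction k with
  | zero =>
    have hj0 : j = 0 := Nat.le_zero.mp hk
    subst hj0
    have hp : (['-'].isPrefixOf cs) = true := (pvPrefixSingle '-' cs).mpr hj
    simp [PySem.Chars.rfind.go, hp]
  | succ k ih =>
    by_cases hjk : j = k + 1
    · subst hjk
      have hp : (['-'].isPrefixOf (cs.drop (k+1))) = true := by
        rw [pvPrefixSingle]
        simpa [List.head?_drop] using hj
      simp [PySem.Chars.rfind.go, hp]
    · have hjk' : j ≤ k := by omega
      have hne := h (k+1) (by omega) (le_refl _)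
      have hpre : (['-'].isPrefixOf (cs.drop (k+1))) ≠ true := by
        intro hp
        exact hne (by simpa [List.head?_drop] using ((pvPrefixSingle '-' _).mp hp))
      simp [PySem.Chars.rfind.go, hpre,
        ih hjk' (fun i hi1 hi2 => h i hi1 (Nat.le_succ_of_le hi2))]

theorem pvRfind_none (cs : List Char) (h : '-' ∉ cs) :
    PySem.Chars.rfind cs ['-'] = -1 := by
  unfold PySem.Chars.rfind
  exact pvGo_of_none cs cs.length (fun i _ hi => h (List.mem_of_getElem? hi))

theorem pvRfind_decomp (u v : List Char) (hv : '-' ∉ v) :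
    PySem.Chars.rfind (u ++ '-' :: v) ['-'] = (u.length : Int) := by
  unfold PySem.Chars.rfind
  apply pvGo_of_last
  · simp
  · simp
  · intro i hi1 _ hc
    have : (u ++ '-' :: v)[i]? = ('-' :: v)[i - u.length]? :=
      List.getElem?_append_right (by omega)
    rw [this] at hc
    rcases Nat.exists_eq_add_of_lt (by omega : u.length < i) with ⟨m, hm⟩
    have : ('-' :: v)[i - u.length]? = v[m]? := by
      have : i - u.length = m + 1 := by omega
      simp [this]
    rw [this] at hc
    exact hv (List.mem_of_getElem? hc)

theorem pvChanges_append (xs ys : List Bool) :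
    pvChanges (xs ++ ys) = pvChanges xs + pvB xs.getLast? ys.head? + pvChanges ys := by
  induction xs with
  | nil => simp [pvChanges, pvB]
  | cons x xs ih =>
    cases xs with
    | nil => cases ys <;> simp [pvChanges, pvB]
    | cons y xs' =>
      have h1 : pvChanges ((x :: y :: xs') ++ ys)
          = (if x ≠ y then 1 else 0) + pvChanges ((y :: xs') ++ ys) := rfl
      have h2 : pvChanges (x :: y :: xs')
          = (if x ≠ y then 1 else 0) + pvChanges (y :: xs') := rfl
      rw [h1, h2, ih, List.getLast?_cons_cons]
      ring

theorem pvChanges_const (l : List Bool) (h : ∀ x ∈ l, x = false) : pvChanges l = 0 := by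
  induction l with
  | nil => rfl
  | cons a t ih =>
    cases t with
    | nil => rfl
    | cons b t' =>
      have ha := h a (by simp)
      have hb := h b (by simp)
      rw [pvChanges, ih (fun x hx => h x (List.mem_cons_of_mem a hx))]
      simp [ha, hb]

theorem pvChanges_map_not (l : List Bool) : pvChanges (l.map not) = pvChanges l := by
  induction l with
  | nil => rfl
  | cons a t ih =>
    cases t with
    | nil => rfl
    | cons b t' =>
      rw [List.map_cons, List.map_cons, pvChanges, ← List.map_cons, ih, pvChanges]
      cases a <;> cases b <;> simp

theorem pvGetLast_allfalse (l : List Bool) (hne : l ≠ []) (h : ∀ x ∈ l, x = false) :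
    l.getLast? = some false := by
  cases hg : l.getLast? with
  | none => exact absurd (List.getLast?_eq_none_iff.mp hg) hne
  | some a => exact congrArg some (h a (List.mem_of_getLast? hg))

theorem pvFoldZip (l : List Bool) (c : Int) :
    (l.zip l.tail).foldl (fun c (ab : Bool × Bool) => if ab.1 ≠ ab.2 then c + 1 else c) c
      = c + pvChanges l := by
  induction l generalizing c with
  | nil => simp [pvChanges]
  | cons a t ih =>
    cases t with
    | nil => simp [pvChanges]
    | cons b t' =>
      have hz : (a :: b :: t').zip (a :: b :: t').tail
          = (a, b) :: ((b :: t').zip (b :: t').tail) := by simp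
      rw [hz, List.foldl_cons, ih,
        show pvChanges (a :: b :: t') = (if a ≠ b then 1 else 0) + pvChanges (b :: t') from rfl]
      by_cases hab : a = b <;> (simp [hab]; try ring)

theorem pvSplitFirst (l : List Bool) (h : true ∈ l) :
    ∃ s t, l = s ++ true :: t ∧ ∀ x ∈ s, x = false := by
  induction l with
  | nil => simp at h
  | cons a l' ih =>
    by_cases ha : a = true
    · exact ⟨[], l', by simp [ha], by simp⟩
    · have ha' : a = false := by cases a <;> simp_all
      have h' : true ∈ l' := by
        rcases List.mem_cons.mp h with h1 | h1
        · exact absurd h1.symm ha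
        · exact h1
      rcases ih h' with ⟨s, t, hst, hs⟩
      refine ⟨a :: s, t, by simp [hst], ?_⟩
      intro x hx
      rcases List.mem_cons.mp hx with h1 | h1
      · rw [h1]; exact ha'
      · exact hs x h1

theorem pvSplitLast (l : List Bool) (h : true ∈ l) :
    ∃ p q, l = p ++ true :: q ∧ ∀ x ∈ q, x = false := by
  rcases pvSplitFirst l.reverse (by simpa using h) with ⟨s, t, hst, hs⟩
  refine ⟨t.reverse, s.reverse, ?_, fun x hx => hs x (by simpa using hx)⟩
  have := congrArg List.reverse hst
  simpa using this

theorem pvSignFlip (b : Bool) : pvFlip (pvSign b) = pvSign (!b) := by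
  cases b <;> rfl

theorem pvSignToList (b : Bool) : (pvSign b).toList = [pvSC b] := by
  cases b <;> rfl

theorem pvJoinSigns (bs : List Bool) :
    (PySem.Str.join "" (bs.map pvSign)).toList = bs.map pvSC := by
  rw [pvJoinChars, List.map_map]
  induction bs with
  | nil => rfl
  | cons b t ih =>
    simp only [List.map_cons, List.flatten_cons, ih, Function.comp_apply, pvSignToList]
    rfl

theorem pvKey (p q : List Bool) (hq : ∀ x ∈ q, x = false) :
    pvChanges (p ++ true :: q) + (if (p ++ true :: q).getLast? = some true then 1 else 0)
      = 1 + pvChanges p + (if p.getLast? = some false then 1 else 0) := by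
  rw [pvChanges_append]
  have hB : pvB p.getLast? (some true) = (if p.getLast? = some false then 1 else 0) := by
    cases hl : p.getLast? with
    | none => simp [pvB]
    | some a => cases a <;> simp [pvB]
  cases q with
  | nil =>
    have hh : (true :: ([] : List Bool)).head? = some true := rfl
    have hc0 : pvChanges [true] = 0 := rfl
    rw [hh, hB, hc0, List.getLast?_concat, if_pos rfl]
    split_ifs <;> omega
  | cons c q' =>
    have hc : c = false := hq c (by simp)
    have hcq : pvChanges (true :: c :: q') = 1 := by
      rw [show pvChanges (true :: c :: q') = (if true ≠ c then 1 else 0) + pvChanges (c :: q') from rfl,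
        pvChanges_const (c :: q') hq]
      simp [hc]
    have hlast : (p ++ true :: c :: q').getLast? = some false := by
      rw [List.getLast?_append_of_ne_nil p (by simp), List.getLast?_cons_cons]
      exact pvGetLast_allfalse _ (by simp) hq
    rw [hcq, hlast, show (true :: c :: q').head? = some true from rfl, hB,
      if_neg (show ¬ ((some false : Option Bool) = some true) by simp)]
    split_ifs <;> ring

theorem pvLoop_signs : ∀ (n : Nat) (bs : List Bool) (c : Int), bs.length ≤ n →
    pancakesLoop c (bs.map pvSign)
      = c + pvChanges bs + (if bs.getLast? = some true then 1 else 0) := by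
  intro n
  induction n with
  | zero =>
    intro bs c hb
    have hbnil : bs = [] := List.length_eq_zero_iff.mp (Nat.le_zero.mp hb)
    subst hbnil
    rw [pancakesLoop]
    have hr : PySem.Chars.rfind ([] : List Char) ['-'] = -1 := by decide
    simp [hr, pvChanges]
  | succ n ih =>
    intro bs c hb
    rw [pancakesLoop]
    have hdash : "-".toList = ['-'] := by decide
    have hrw : PySem.Str.rfind (PySem.Str.join "" (bs.map pvSign)) "-"
        = PySem.Chars.rfind (bs.map pvSC) ['-'] := by
      show PySem.Chars.rfind (PySem.Str.join "" (bs.map pvSign)).toList "-".toList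
          = PySem.Chars.rfind (bs.map pvSC) ['-']
      rw [pvJoinSigns, hdash]
    by_cases ht : true ∈ bs
    · rcases pvSplitLast bs ht with ⟨p, q, hpq, hq⟩
      have hmap : bs.map pvSC = p.map pvSC ++ '-' :: q.map pvSC := by
        simp [hpq, pvSC]
      have hnq : '-' ∉ q.map pvSC := by
        intro hm
        rcases List.mem_map.mp hm with ⟨b, hb', he⟩
        rw [hq b hb'] at he
        simp [pvSC] at he
      have hfi : PySem.Chars.rfind (bs.map pvSC) ['-'] = (p.length : Int) := by
        rw [hmap]
        simpa using pvRfind_decomp (p.map pvSC) (q.map pvSC) hnq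
      have hne : ¬ ((p.length : Int) = -1) := by omega
      rw [hrw, hfi, if_neg hne]
      have hslice : PySem.List.slice (bs.map pvSign) none (some (p.length : Int))
          = p.map pvSign := by
        rw [PySem.List.slice_to_natCast]
        rw [hpq]
        rw [show (p ++ true :: q).map pvSign = p.map pvSign ++ (true :: q).map pvSign from by
          simp]
        rw [show p.length = (p.map pvSign).length from by simp]
        exact List.take_left
      rw [hslice]
      have hflip : (p.map pvSign).map pvFlip = (p.map not).map pvSign := by
        rw [List.map_map, List.map_map]
        exact List.map_congr_left (fun b _ => pvSignFlip b)
      rw [hflip]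
      have hlen : (p.map not).length ≤ n := by
        have := congrArg List.length hpq
        simp at this ⊢
        omega
      rw [ih (p.map not) (c + 1) hlen]
      rw [pvChanges_map_not]
      have hgl : (p.map not).getLast? = p.getLast?.map not := by simp
      have hcond : (if (p.map not).getLast? = some true then (1:Int) else 0)
          = (if p.getLast? = some false then 1 else 0) := by
        rw [hgl]
        cases hl : p.getLast? with
        | none => simp
        | some a => cases a <;> simp
      rw [hcond, hpq]
      have := pvKey p q hq
      omega
    · have hall : ∀ x ∈ bs, x = false := by
        intro x hx
        cases hxv : x with
        | true => exact absurd (hxv ▸ hx) ht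
        | false => rfl
      have hnm : '-' ∉ bs.map pvSC := by
        intro hm
        rcases List.mem_map.mp hm with ⟨b, hb', he⟩
        rw [hall b hb'] at he
        simp [pvSC] at he
      rw [hrw, pvRfind_none _ hnm]
      rw [pvChanges_const bs hall]
      have : ¬ (bs.getLast? = some true) := by
        cases hbs : bs with
        | nil => simp
        | cons a t =>
          rw [← hbs, pvGetLast_allfalse bs (by simp [hbs]) hall]
          simp
      simp [this]

-- ===== VERDICT (by name: the statement is the Claim_ definition above) =====
theorem pancakes_spec : Claim_equal_pancakes := by
  unfold Claim_equal_pancakes Spec_pancakes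
  intro stack _
  show pancakesLoop 0 stack = pancakes_alt stack
  rw [pancakesLoop]
  simp only [pancakes_alt]
  by_cases hj : PySem.Str.rfind (PySem.Str.join "" stack) "-" = -1
  · rw [if_pos hj, if_pos hj]
  · rw [if_neg hj, if_neg hj]
    have hfi : PySem.Str.rfind (PySem.Str.join "" stack) "-"
        = PySem.Chars.rfind (PySem.Str.join "" stack).toList ['-'] := by
      simp [PySem.Str.rfind]
    rcases pvGo_cases (PySem.Str.join "" stack).toList (PySem.Str.join "" stack).toList.length
      with h1 | ⟨j, _, hgo, _⟩
    · exact absurd (hfi.trans h1) hj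
    · have hjval : PySem.Str.rfind (PySem.Str.join "" stack) "-" = (j : Int) := by
        rw [hfi]; unfold PySem.Chars.rfind; exact hgo
      rw [hjval, PySem.List.slice_to_natCast, show (0 : Int) + 1 = 1 from rfl]
      set sub := stack.take j with hsub
      set bs := sub.map (fun e => decide (e = "-")) with hbs
      have hflip : sub.map pvFlip = (bs.map not).map pvSign := by
        rw [hbs, List.map_map, List.map_map]
        apply List.map_congr_left
        intro e _
        by_cases he : e = "-" <;> simp [pvFlip, pvSign, he, Function.comp]
      rw [hflip, pvLoop_signs (bs.map not).length (bs.map not) 1 (le_refl _)]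
      rw [pvChanges_map_not, pvFoldZip bs 1]
      have hgl : (bs.map not).getLast? = bs.getLast?.map not := by simp
      cases hl : bs.getLast? with
      | none => simp [hgl, hl]
      | some a => cases a <;> simp [hgl, hl]
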